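-- pv_equiv track=rewrite | github.com/AYKondo/advent_of_code_2019 | day_05/1-test.py | get_opcode
-- ===== SOURCE A (Python) =====
-- def get_opcode(code):
--     if code < 10:
--         return code, []
--     else:
--         code_list = [int(x) for x in str(code)]
--         code = str(code_list.pop(-2))
--         code += str(code_list.pop(-1))
--         return int(code), code_list
-- ===== SOURCE B (Python) =====
-- def get_opcode(code):
--     if code < 10:
--         return code, []
--     modes, op = divmod(code, 100)
--     return op, [int(d) for d in str(modes)] if modes else []
-- ===== Notes on version B (the rewrite author's own statement) =====
-- stated objective: simpler
-- what changed: Replaces the string/list digit manipulation (build digit list, pop the two low digits, re-concatenate and re-parse them) by one arithmetic divmod(code, 100): op and modes fall out directly, and only the leading digits are stringified for the mode list.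
import Mathlib
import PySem

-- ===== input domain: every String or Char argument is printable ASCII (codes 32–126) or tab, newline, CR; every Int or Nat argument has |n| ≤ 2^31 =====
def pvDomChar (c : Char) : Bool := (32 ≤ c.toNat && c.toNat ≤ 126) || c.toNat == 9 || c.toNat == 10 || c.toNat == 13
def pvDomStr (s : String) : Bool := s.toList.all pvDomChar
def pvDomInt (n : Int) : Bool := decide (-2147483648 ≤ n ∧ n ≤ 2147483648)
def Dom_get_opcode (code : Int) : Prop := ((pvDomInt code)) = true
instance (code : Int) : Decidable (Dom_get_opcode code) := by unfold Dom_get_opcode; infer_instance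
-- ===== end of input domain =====

-- B replaces A's string/list digit popping by divmod(code, 100): simpler arithmetic decomposition, same results.


-- int(x) for a one-character string x; exact here: both Pythons apply it only to digit characters of str(n) for n ≥ 0
def pvDigit (c : Char) : Int := (PySem.Int.ofChars? [c]).getD 0

-- ===== PORT A =====
def get_opcode (code : Int) : Int × List Int :=
  if code < 10 then (code, [])
  else
    let code_list := (PySem.Int.toChars code).map pvDigit
    match PySem.List.pop? code_list (-2) with
    | none => (0, [])  -- unreachable: str(code) has ≥ 2 digits when code ≥ 10
    | some (d2, l1) =>
      match PySem.List.pop? l1 (-1) with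
      | none => (0, [])  -- unreachable likewise
      | some (d1, l2) =>
        -- code = str(d2); code += str(d1); return int(code), code_list
        ((PySem.Int.ofChars? (PySem.Int.toChars d2 ++ PySem.Int.toChars d1)).getD 0, l2)

-- ===== PORT B =====
def get_opcode_alt (code : Int) : Int × List Int :=
  if code < 10 then (code, [])
  else
    let modes := PySem.Int.floordiv code 100
    let op := PySem.Int.mod code 100
    (op, if modes = 0 then [] else (PySem.Int.toChars modes).map pvDigit)

-- ===== PRECONDITION & SPEC =====
def Spec_get_opcode (code : Int) (out : Int × List Int) : Prop := out = get_opcode_alt code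
instance (code : Int) (out : Int × List Int) : Decidable (Spec_get_opcode code out) := by unfold Spec_get_opcode; infer_instance

-- ===== CLAIM (what is proved, stated in full; the proofs are below) =====
def Claim_equal_get_opcode : Prop := ∀ (code : Int), Dom_get_opcode code → Spec_get_opcode code (get_opcode code)

-- ===== LEMMAS AND PROOFS =====

theorem pvCore_append (f : Nat) : ∀ (n : Nat) (ds : List Char),
    Nat.toDigitsCore 10 f n ds = Nat.toDigitsCore 10 f n [] ++ ds := by
  induction f with
  | zero => intro n ds; simp [Nat.toDigitsCore]
  | succ f ih =>
    intro n ds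
    simp only [Nat.toDigitsCore]
    by_cases h : n / 10 = 0
    · simp [h]
    · simp only [h, if_false]
      rw [ih (n / 10) ((n % 10).digitChar :: ds), ih (n / 10) [(n % 10).digitChar]]
      simp

theorem pvCore_irrel (f : Nat) : ∀ (g n : Nat) (ds : List Char), n < f → n < g →
    Nat.toDigitsCore 10 f n ds = Nat.toDigitsCore 10 g n ds := by
  induction f with
  | zero => intro g n ds h; omega
  | succ f ih =>
    intro g n ds hf hg
    match g, hg with
    | g + 1, hg =>
      simp only [Nat.toDigitsCore]
      by_cases h : n / 10 = 0
      · simp [h]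
      · simp only [h, if_false]
        exact ih g (n / 10) _ (by omega) (by omega)

theorem pvToDigits_lt (n : Nat) (h : n < 10) : Nat.toDigits 10 n = [Nat.digitChar n] := by
  simp [Nat.toDigits, Nat.toDigitsCore, Nat.div_eq_of_lt h, Nat.mod_eq_of_lt h]

theorem pvToDigits_step (n : Nat) (h : 10 ≤ n) :
    Nat.toDigits 10 n = Nat.toDigits 10 (n / 10) ++ [Nat.digitChar (n % 10)] := by
  have h10 : ¬ (n / 10 = 0) := by omega
  conv_lhs => rw [Nat.toDigits]
  show Nat.toDigitsCore 10 (n + 1) n [] = _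
  rw [Nat.toDigitsCore]
  simp only [h10, if_false]
  rw [pvCore_append, pvCore_irrel n (n / 10 + 1) (n / 10) [] (by omega) (by omega)]
  rfl

theorem pvDigit_digitChar (r : Nat) (h : r < 10) : pvDigit (Nat.digitChar r) = (r : Int) := by
  interval_cases r <;> decide

theorem pvOfChars_two (t o : Nat) (ht : t < 10) (ho : o < 10) :
    PySem.Int.ofChars? [Nat.digitChar t, Nat.digitChar o] = some ((10 * t + o : Nat) : Int) := by
  interval_cases t <;> interval_cases o <;> decide

theorem pvToChars_natCast (k : Nat) : PySem.Int.toChars (k : Int) = Nat.toDigits 10 k := by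
  simp [PySem.Int.toChars]

theorem pvToChars_nonneg (a : Int) (h : 0 ≤ a) :
    PySem.Int.toChars a = Nat.toDigits 10 a.toNat := by
  simp [PySem.Int.toChars, not_lt.mpr h]

theorem pvErase_penult {α : Type} (P : List α) (t o : α) :
    (P ++ [t, o]).eraseIdx P.length = P ++ [o] := by
  induction P with
  | nil => rfl
  | cons x xs ih => simpa using ih

theorem pvPop_neg2 {α : Type} (P : List α) (t o : α) :
    PySem.List.pop? (P ++ [t, o]) (-2) = some (t, P ++ [o]) := by
  have hidx : PySem.List.pyIdx? (P.length + 2) (-2) = some P.length := by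
    simp [PySem.List.pyIdx?]
  simp [PySem.List.pop?, hidx, pvErase_penult]

theorem pvFloordiv_hundred (a : Int) : PySem.Int.floordiv a 100 = a / 100 := by
  simp [PySem.Int.floordiv, Int.fdiv_eq_ediv]

theorem pvMod_hundred (a : Int) : PySem.Int.mod a 100 = a % 100 := by
  simp [PySem.Int.mod, Int.fmod_eq_emod]

-- A's else-branch value, computed in closed form
theorem pvA_else (code : Int) (h : ¬ code < 10) :
    get_opcode code = (code % 100,
      if code / 100 = 0 then [] else (Nat.toDigits 10 (code / 100).toNat).map pvDigit) := by
  have hm : (10 : Nat) ≤ code.toNat := by omega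
  have hcode : code = (code.toNat : Int) := by omega
  set m := code.toNat with hmdef
  by_cases hlt : m < 100
  · -- two digits: code_list = [m/10, m%10], modes = 0
    have hsplit : Nat.toDigits 10 m = [Nat.digitChar (m / 10), Nat.digitChar (m % 10)] := by
      rw [pvToDigits_step m hm, pvToDigits_lt (m / 10) (by omega)]
      simp
    have hdiv : code / 100 = 0 := by omega
    simp only [get_opcode, h, if_false]
    rw [hcode, pvToChars_natCast, hsplit]
    simp only [List.map_cons, List.map_nil]
    rw [pvDigit_digitChar (m / 10) (by omega), pvDigit_digitChar (m % 10) (by omega)]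
    rw [show ([(↑(m / 10) : Int), ↑(m % 10)]) = ([] : List Int) ++ [(↑(m / 10) : Int), ↑(m % 10)] by rfl]
    rw [pvPop_neg2]
    simp only [List.nil_append]
    rw [show ([(↑(m % 10) : Int)]) = ([] : List Int) ++ [(↑(m % 10) : Int)] by rfl, PySem.List.pop?_last]
    simp only
    rw [pvToChars_natCast, pvToChars_natCast,
        pvToDigits_lt (m / 10) (by omega), pvToDigits_lt (m % 10) (by omega)]
    rw [List.singleton_append, pvOfChars_two (m / 10) (m % 10) (by omega) (by omega)]
    rw [hcode] at hdiv
    simp only [Option.getD_some, hdiv, if_true, Prod.mk.injEq]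
    exact ⟨by omega, trivial⟩
  · -- three or more digits
    have hm2 : 10 ≤ m / 10 := by omega
    have hsplit : Nat.toDigits 10 m =
        Nat.toDigits 10 (m / 100) ++ [Nat.digitChar (m / 10 % 10), Nat.digitChar (m % 10)] := by
      rw [pvToDigits_step m hm, pvToDigits_step (m / 10) hm2]
      rw [Nat.div_div_eq_div_mul]
      simp
    have hdiv : ¬ (code / 100 = 0) := by omega
    have htn : (code / 100).toNat = m / 100 := by omega
    simp only [get_opcode, h, if_false]
    rw [hcode, pvToChars_natCast, hsplit]
    simp only [List.map_append, List.map_cons, List.map_nil]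
    rw [pvDigit_digitChar (m / 10 % 10) (by omega), pvDigit_digitChar (m % 10) (by omega)]
    rw [pvPop_neg2]
    simp only
    rw [PySem.List.pop?_last]
    simp only
    rw [pvToChars_natCast, pvToChars_natCast,
        pvToDigits_lt (m / 10 % 10) (by omega), pvToDigits_lt (m % 10) (by omega)]
    rw [List.singleton_append, pvOfChars_two (m / 10 % 10) (m % 10) (by omega) (by omega)]
    rw [hcode] at hdiv htn
    simp only [Option.getD_some, hdiv, if_false, htn, Prod.mk.injEq]
    exact ⟨by omega, trivial⟩

-- ===== VERDICT (by name: the statement is the Claim_ definition above) =====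
theorem get_opcode_spec : Claim_equal_get_opcode := by
  intro code _
  unfold Spec_get_opcode
  by_cases h : code < 10
  · simp [get_opcode, get_opcode_alt, h]
  · rw [pvA_else code h]
    simp only [get_opcode_alt, h, if_false]
    rw [pvFloordiv_hundred, pvMod_hundred]
    by_cases hz : code / 100 = 0
    · simp [hz]
    · simp only [hz, if_false]
      rw [pvToChars_nonneg (code / 100) (by omega)]
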